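-- pv_equiv track=rewrite | github.com/jpalmert/scumm-translate-swe | tools/calc_padding.py | scumm_byte_len
-- ===== SOURCE A (Python) =====
-- def scumm_byte_len(text):
--     """Count SCUMM bytes. \\NNN = 1 byte, each other char = 1 byte."""
--     n, i = 0, 0
--     while i < len(text):
--         if text[i] == '\\' and i + 3 < len(text) and text[i+1:i+4].isdigit():
--             n += 1
--             i += 4
--         else:
--             n += 1
--             i += 1
--     return n
-- ===== SOURCE B (Python) =====
-- def scumm_byte_len(text):
--     """Count SCUMM bytes: len(text) minus 3 per \\NNN escape, found by jumping
--     between backslashes with str.find instead of walking every character."""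
--     count, i = 0, 0
--     while True:
--         j = text.find('\\', i)
--         if j == -1 or j + 3 >= len(text):
--             break
--         if text[j+1:j+4].isdigit():
--             count += 1
--             i = j + 4
--         else:
--             i = j + 1
--     return len(text) - 3 * count
-- ===== Notes on version B (the rewrite author's own statement) =====
-- stated objective: faster
-- what changed: B jumps between backslashes with str.find and counts escapes, returning len(text) - 3*count, instead of A's per-character while-loop byte counter.
import Mathlib
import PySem

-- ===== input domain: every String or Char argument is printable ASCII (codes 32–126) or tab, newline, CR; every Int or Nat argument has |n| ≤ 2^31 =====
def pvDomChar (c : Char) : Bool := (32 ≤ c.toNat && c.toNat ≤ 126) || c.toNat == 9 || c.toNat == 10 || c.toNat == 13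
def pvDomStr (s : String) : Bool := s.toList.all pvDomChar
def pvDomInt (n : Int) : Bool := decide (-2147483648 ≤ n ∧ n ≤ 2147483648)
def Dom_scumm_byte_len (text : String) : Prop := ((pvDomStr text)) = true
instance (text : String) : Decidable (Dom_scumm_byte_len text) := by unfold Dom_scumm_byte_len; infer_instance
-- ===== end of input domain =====

-- B replaces A's char-by-char walk by str.find jumps between backslashes and returns
-- len(text) - 3 * (number of '\NNN' escapes); objective: faster (C-level find, measured).

-- ===== PORT A =====
-- A: while i < len(text): count 1 byte; a '\NNN' escape consumes 4 chars, anything else 1.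
def scummALoop (cs : List Char) (n : Int) (i : Nat) : Int :=
  if i < cs.length then
    if cs[i]? = some '\\' ∧ i + 3 < cs.length ∧
        PySem.Chars.strIsdigit
          (PySem.List.slice cs (some ((i : Int) + 1)) (some ((i : Int) + 4))) = true then
      scummALoop cs (n + 1) (i + 4)
    else
      scummALoop cs (n + 1) (i + 1)
  else n
termination_by cs.length - i

def scumm_byte_len (text : String) : Int := scummALoop text.toList 0 0

-- ===== PORT B =====
-- B: while True: j = text.find('\\', i); break on j == -1 or j + 3 >= len(text);
-- an escape bumps count and jumps to j+4, a lone backslash jumps to j+1.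
-- fuel = len(text)+1 bounds the iterations (each one moves i strictly past j ≥ i).
def scummBLoop (text : String) (fuel : Nat) (count : Int) (i : Int) : Int :=
  match fuel with
  | 0 => count
  | fuel + 1 =>
    let j := PySem.Str.findFrom text "\\" i none
    if j = -1 ∨ PySem.Str.len text ≤ j + 3 then count
    else if PySem.Str.strIsdigit (PySem.Str.slice text (some (j + 1)) (some (j + 4))) = true then
      scummBLoop text fuel (count + 1) (j + 4)
    else
      scummBLoop text fuel count (j + 1)

def scumm_byte_len_alt (text : String) : Int :=
  PySem.Str.len text - 3 * scummBLoop text ((PySem.Str.len text).toNat + 1) 0 0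

-- ===== PRECONDITION & SPEC =====
def Spec_scumm_byte_len (text : String) (out : Int) : Prop := out = scumm_byte_len_alt text
instance (text : String) (out : Int) : Decidable (Spec_scumm_byte_len text out) := by unfold Spec_scumm_byte_len; infer_instance

-- ===== CLAIM (what is proved, stated in full; the proofs are below) =====
def Claim_equal_scumm_byte_len : Prop := ∀ (text : String), Dom_scumm_byte_len text → Spec_scumm_byte_len text (scumm_byte_len text)

-- ===== LEMMAS AND PROOFS =====

-- number of '\NNN' escapes A's greedy scan finds from position i on
def escFrom (cs : List Char) (i : Nat) : Nat :=
  if i < cs.length then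
    if cs[i]? = some '\\' ∧ i + 3 < cs.length ∧
        PySem.Chars.strIsdigit
          (PySem.List.slice cs (some ((i : Int) + 1)) (some ((i : Int) + 4))) = true then
      1 + escFrom cs (i + 4)
    else
      escFrom cs (i + 1)
  else 0
termination_by cs.length - i

lemma singleton_prefix_drop (cs : List Char) (m : Nat) (c : Char) :
    [c] <+: cs.drop m ↔ cs[m]? = some c := by
  rw [← List.head?_drop]
  cases h : cs.drop m with
  | nil => simp
  | cons a t => simp [List.cons_prefix_cons, eq_comm]

lemma escFrom_end (cs : List Char) : ∀ k i, cs.length - i ≤ k → cs.length ≤ i + 3 →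
    escFrom cs i = 0 := by
  intro k
  induction k with
  | zero => intro i h1 _; rw [escFrom, if_neg (by omega)]
  | succ k ih =>
    intro i h1 h2
    rw [escFrom]
    by_cases hi : i < cs.length
    · rw [if_pos hi, if_neg (by rintro ⟨_, h, _⟩; omega)]
      exact ih (i + 1) (by omega) (by omega)
    · rw [if_neg hi]

lemma escFrom_skip (cs : List Char) : ∀ d i t, t - i ≤ d → i ≤ t → t ≤ cs.length →
    (∀ m, i ≤ m → m < t → cs[m]? ≠ some '\\') → escFrom cs i = escFrom cs t := by
  intro d
  induction d with
  | zero => intro i t h1 h2 _ _; obtain rfl : i = t := (by omega); rfl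
  | succ d ih =>
    intro i t h1 h2 h3 hnb
    by_cases hit : i = t
    · rw [hit]
    · have hi : i < cs.length := by omega
      rw [escFrom, if_pos hi, if_neg (by rintro ⟨h, _, _⟩; exact hnb i le_rfl (by omega) h)]
      exact ih (i + 1) t (by omega) (by omega) h3 (fun m hm => hnb m (by omega))

lemma aloop_eq (cs : List Char) : ∀ k i n, cs.length - i ≤ k →
    scummALoop cs n i = n + ((cs.length - i : Nat) : Int) - 3 * (escFrom cs i : Int) := by
  intro k
  induction k with
  | zero =>
    intro i n h
    rw [scummALoop, escFrom, if_neg (by omega), if_neg (by omega)]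
    have : cs.length - i = 0 := by omega
    simp [this]
  | succ k ih =>
    intro i n h
    rw [scummALoop, escFrom]
    by_cases hi : i < cs.length
    · rw [if_pos hi, if_pos hi]
      by_cases hg : cs[i]? = some '\\' ∧ i + 3 < cs.length ∧
          PySem.Chars.strIsdigit
            (PySem.List.slice cs (some ((i : Int) + 1)) (some ((i : Int) + 4))) = true
      · rw [if_pos hg, if_pos hg, ih (i + 4) (n + 1) (by omega)]
        obtain ⟨-, h4, -⟩ := hg
        omega
      · rw [if_neg hg, if_neg hg, ih (i + 1) (n + 1) (by omega)]
        omega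
    · rw [if_neg hi, if_neg hi]
      have : cs.length - i = 0 := by omega
      simp [this]

lemma bloop_eq (text : String) : ∀ fuel (k : Nat) count, k ≤ text.toList.length →
    text.toList.length + 1 - k ≤ fuel →
    scummBLoop text fuel count (k : Int) = count + (escFrom text.toList k : Int) := by
  intro fuel
  induction fuel with
  | zero => intro k count hk hf; omega
  | succ fuel ih =>
    intro k count hk hf
    set cs := text.toList with hcs
    rw [scummBLoop]
    simp only [PySem.Str.findFrom_eq, ← hcs]
    have hsub : ("\\").toList = ['\\'] := rfl
    rw [hsub]
    by_cases hJ : PySem.Chars.findFrom cs ['\\'] (k : Int) = -1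
    · rw [if_pos (Or.inl hJ)]
      have hni : ¬ ['\\'] <:+: cs.drop k :=
        (PySem.Chars.findFrom_natCast_eq_neg_one_iff cs ['\\'] k hk).mp hJ
      have hnb : ∀ m, k ≤ m → m < cs.length → cs[m]? ≠ some '\\' := by
        intro m hm _ hme
        apply hni
        rw [List.singleton_infix_iff]
        have := List.mem_of_getElem? (i := m - k) (a := '\\') (l := cs.drop k)
        apply this
        rw [List.getElem?_drop]
        rw [show k + (m - k) = m from by omega]
        exact hme
      rw [escFrom_skip cs cs.length k cs.length (by omega) hk le_rfl hnb,
          escFrom, if_neg (by omega)]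
      simp
    · obtain ⟨hkJ, hpre, hmin⟩ :=
        PySem.Chars.findFrom_natCast_spec cs ['\\'] k hk hJ
      set J := PySem.Chars.findFrom cs ['\\'] (k : Int) with hJdef
      have hJnn : 0 ≤ J := le_trans (by exact_mod_cast Nat.zero_le k) hkJ
      set jn := J.toNat with hjn
      have hJeq : J = (jn : Int) := (Int.toNat_of_nonneg hJnn).symm
      have hbs : cs[jn]? = some '\\' := (singleton_prefix_drop cs jn '\\').mp hpre
      have hjlt : jn < cs.length := (List.getElem?_eq_some_iff.mp hbs).1
      have hkjn : k ≤ jn := by omega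
      have hskip : escFrom cs k = escFrom cs jn :=
        escFrom_skip cs cs.length k jn (by omega) hkjn (by omega)
          (fun m hm1 hm2 hme =>
            hmin m hm1 hm2 ((singleton_prefix_drop cs m '\\').mpr hme))
      have hlen : PySem.Str.len text = (cs.length : Int) := by
        simp [PySem.Str.len_eq, hcs]
      by_cases hend : cs.length ≤ jn + 3
      · rw [if_pos (Or.inr (by rw [hlen, hJeq]; omega))]
        rw [hskip, escFrom_end cs cs.length jn (by omega) hend]
        simp
      · rw [if_neg (by rw [hlen, hJeq]; rintro (h | h) <;> omega)]
        have hdig : PySem.Str.strIsdigit (PySem.Str.slice text (some (J + 1)) (some (J + 4)))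
            = PySem.Chars.strIsdigit
              (PySem.List.slice cs (some ((jn : Int) + 1)) (some ((jn : Int) + 4))) := by
          rw [hJeq]
          simp [PySem.Str.strIsdigit_eq, PySem.Str.toList_slice, hcs]
        rw [hdig]
        by_cases hd : PySem.Chars.strIsdigit
            (PySem.List.slice cs (some ((jn : Int) + 1)) (some ((jn : Int) + 4))) = true
        · rw [if_pos hd]
          have hJ4 : J + 4 = ((jn + 4 : Nat) : Int) := by rw [hJeq]; push_cast; ring
          have hesc : escFrom cs jn = 1 + escFrom cs (jn + 4) := by
            conv_lhs => rw [escFrom]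
            rw [if_pos hjlt, if_pos ⟨hbs, by omega, hd⟩]
          rw [hJ4, ih (jn + 4) (count + 1) (by omega) (by omega), hskip, hesc]
          push_cast
          ring
        · rw [if_neg hd]
          have hJ1 : J + 1 = ((jn + 1 : Nat) : Int) := by rw [hJeq]; push_cast; ring
          have hesc : escFrom cs jn = escFrom cs (jn + 1) := by
            conv_lhs => rw [escFrom]
            rw [if_pos hjlt, if_neg (by rintro ⟨-, -, h⟩; exact hd h)]
          rw [hJ1, ih (jn + 1) count (by omega) (by omega), hskip, hesc]

-- ===== VERDICT (by name: the statement is the Claim_ definition above) =====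
theorem scumm_byte_len_spec : Claim_equal_scumm_byte_len := by
  intro text _
  unfold Spec_scumm_byte_len scumm_byte_len scumm_byte_len_alt
  have hlen : PySem.Str.len text = (text.toList.length : Int) := by simp [PySem.Str.len_eq]
  rw [aloop_eq text.toList (text.toList.length) 0 0 (by omega), hlen]
  rw [show ((text.toList.length : Int).toNat + 1) = text.toList.length + 1 by simp]
  have hb := bloop_eq text (text.toList.length + 1) 0 0 (by omega) (by omega)
  simp only [Nat.cast_zero, zero_add] at hb
  rw [hb]
  omega
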